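-- pv_equiv track=rewrite | github.com/pt-lu/quoridor | test.py | hashBoard
-- ===== SOURCE A (Python) =====
-- def hashBoard(width):
--     board = {}
--     temp = 0
--     for i in range(width):
--         for j in range(width):
--             board[(i,j)] = temp
--             temp += 1
--     return board
-- ===== SOURCE B (Python) =====
-- def hashBoard(width):
--     # Single flat pass: enumerate cell indices 0..width*width-1 and recover
--     # the coordinates of each index with divmod, instead of nested loops
--     # threading a counter.
--     if width <= 0:
--         return {}
--     return {divmod(k, width): k for k in range(width * width)}
-- ===== Notes on version B (the rewrite author's own statement) =====
-- stated objective: alternative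
-- what changed: Replaced the nested row/column loops with a threaded counter by a single flat loop over range(width*width) that recovers each cell's coordinates via divmod.
import Mathlib
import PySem

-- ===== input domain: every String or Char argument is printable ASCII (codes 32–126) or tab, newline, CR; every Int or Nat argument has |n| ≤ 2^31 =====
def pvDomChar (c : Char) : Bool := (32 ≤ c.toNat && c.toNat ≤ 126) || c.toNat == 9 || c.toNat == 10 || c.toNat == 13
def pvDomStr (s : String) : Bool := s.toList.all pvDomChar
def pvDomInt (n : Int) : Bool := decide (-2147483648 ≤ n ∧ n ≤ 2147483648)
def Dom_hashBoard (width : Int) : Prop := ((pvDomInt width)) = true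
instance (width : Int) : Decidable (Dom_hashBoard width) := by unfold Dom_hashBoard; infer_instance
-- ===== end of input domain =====

-- B replaces A's nested loops with a counter by one flat loop over range(width*width),
-- recovering coordinates via divmod (objective: alternative).

-- ===== PORT A =====
-- A: dict filled by nested loops over range(width), value = running counter `temp`.
def hashBoard (width : Int) : List (Int × Int × Int) :=
  let st : PySem.Dict (Int × Int) Int × Int :=
    (PySem.List.pyRange 0 width 1).foldl
      (fun st i =>
        (PySem.List.pyRange 0 width 1).foldl
          (fun st j => (st.1.insert (i, j) st.2, st.2 + 1)) st)
      (PySem.Dict.empty, 0)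
  st.1.items.map (fun p => (p.1.1, p.1.2, p.2))

-- ===== PORT B =====
-- B: one flat loop over range(width*width); coordinates recovered by divmod(k, width).
def hashBoard_alt (width : Int) : List (Int × Int × Int) :=
  if width ≤ 0 then []
  else
    ((PySem.List.pyRange 0 (width * width) 1).foldl
        (fun b k => b.insert (PySem.Int.floordiv k width, PySem.Int.mod k width) k)
        PySem.Dict.empty).items.map (fun p => (p.1.1, p.1.2, p.2))

-- ===== PRECONDITION & SPEC =====
def Spec_hashBoard (width : Int) (out : List (Int × Int × Int)) : Prop := out = hashBoard_alt width
instance (width : Int) (out : List (Int × Int × Int)) : Decidable (Spec_hashBoard width out) := by unfold Spec_hashBoard; infer_instance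

-- ===== CLAIM (what is proved, stated in full; the proofs are below) =====
def Claim_equal_hashBoard : Prop := ∀ (width : Int), Dom_hashBoard width → Spec_hashBoard width (hashBoard width)

-- ===== LEMMAS AND PROOFS =====

-- A's inner row loop: starting the counter at i*width + a, it produces the same dict as
-- inserting (i,j) ↦ i*width + j for j in the same range, ending with counter i*width + a + n.
lemma hashBoard_inner_eq (width i : Int) (n : Nat) :
    ∀ (a : Int) (d : PySem.Dict (Int × Int) Int),
      (PySem.List.pyRange a (a + n) 1).foldl
          (fun st j => (st.1.insert (i, j) st.2, st.2 + 1)) (d, i * width + a)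
        = ((PySem.List.pyRange a (a + n) 1).foldl
             (fun b j => b.insert (i, j) (i * width + j)) d, i * width + a + n) := by
  induction n with
  | zero =>
      intro a d
      simp
  | succ m ih =>
      intro a d
      have hlt : a < a + ((m : Nat) + 1 : Nat) := by push_cast; omega
      rw [PySem.List.pyRange_one_cons hlt]
      simp only [List.foldl_cons]
      have hre : a + ((m : Nat) + 1 : Nat) = (a + 1) + (m : Nat) := by push_cast; ring
      rw [hre]
      have h1 : i * width + a + 1 = i * width + (a + 1) := by ring
      rw [h1, ih (a + 1) (d.insert (i, a) (i * width + a)), Prod.mk.injEq]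
      exact ⟨rfl, by push_cast; ring⟩

-- B's flat fold over one row's worth of indices equals the coordinate-form row fold.
lemma hashBoard_row_eq (width a : Int) (hw : 0 < width) (n : Nat) :
    ∀ (j : Int) (d : PySem.Dict (Int × Int) Int), 0 ≤ j → j + n ≤ width →
      (PySem.List.pyRange (a * width + j) (a * width + j + n) 1).foldl
          (fun b k => b.insert (PySem.Int.floordiv k width, PySem.Int.mod k width) k) d
        = (PySem.List.pyRange j (j + n) 1).foldl
            (fun b j' => b.insert (a, j') (a * width + j')) d := by
  induction n with
  | zero =>
      intro j d _ _
      simp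
  | succ m ih =>
      intro j d hj hjn
      have hlt1 : a * width + j < a * width + j + ((m : Nat) + 1 : Nat) := by push_cast; omega
      have hlt2 : j < j + ((m : Nat) + 1 : Nat) := by push_cast; omega
      rw [PySem.List.pyRange_one_cons hlt1, PySem.List.pyRange_one_cons hlt2]
      simp only [List.foldl_cons]
      have hjw : j < width := by push_cast at hjn; omega
      have hdiv : PySem.Int.floordiv (a * width + j) width = a := by
        rw [PySem.Int.floordiv_eq_iff_of_pos hw]
        constructor <;> nlinarith
      have hmod : PySem.Int.mod (a * width + j) width = j := by
        have h := PySem.Int.floordiv_mul_add_mod (a * width + j) width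
        rw [hdiv] at h
        omega
      rw [hdiv, hmod]
      have hre1 : a * width + j + ((m : Nat) + 1 : Nat) = (a * width + (j + 1)) + (m : Nat) := by
        push_cast; ring
      have hre2 : j + ((m : Nat) + 1 : Nat) = (j + 1) + (m : Nat) := by push_cast; ring
      have hre3 : a * width + j + 1 = a * width + (j + 1) := by ring
      rw [hre1, hre2, hre3]
      exact ih (j + 1) _ (by omega) (by push_cast at hjn ⊢; omega)

-- Outer invariant: A's fold over rows a..a+n-1 from counter a*width equals B's flat
-- fold over the index range [a*width, (a+n)*width), paired with counter (a+n)*width.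
lemma hashBoard_outer_eq (width : Int) (hw : 0 < width) (n : Nat) :
    ∀ (a : Int) (d : PySem.Dict (Int × Int) Int),
      (PySem.List.pyRange a (a + n) 1).foldl
          (fun st i =>
            (PySem.List.pyRange 0 width 1).foldl
              (fun st j => (st.1.insert (i, j) st.2, st.2 + 1)) st)
          (d, a * width)
        = ((PySem.List.pyRange (a * width) ((a + n) * width) 1).foldl
             (fun b k => b.insert (PySem.Int.floordiv k width, PySem.Int.mod k width) k) d,
           (a + n) * width) := by
  induction n with
  | zero =>
      intro a d
      simp
  | succ m ih =>
      intro a d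
      have hlt : a < a + ((m : Nat) + 1 : Nat) := by push_cast; omega
      rw [PySem.List.pyRange_one_cons hlt]
      simp only [List.foldl_cons]
      -- A's first row via the counter lemma
      have hrange : PySem.List.pyRange 0 width 1
          = PySem.List.pyRange 0 (0 + (width.toNat : Nat)) 1 := by
        congr 1; omega
      have hinner := hashBoard_inner_eq width a (width.toNat) 0 d
      simp only [add_zero] at hinner
      rw [← hrange] at hinner
      rw [hinner]
      -- split B's flat range at (a+1)*width
      have hsplit := PySem.List.pyRange_one_append (a * width) ((a + 1) * width)
          ((a + ((m : Nat) + 1 : Nat)) * width)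
          (by nlinarith) (by push_cast; nlinarith)
      rw [hsplit, List.foldl_append]
      -- first chunk = the coordinate-form row fold
      have hrow := hashBoard_row_eq width a hw (width.toNat) 0 d (le_refl 0)
          (by omega)
      have hwcast : ((width.toNat : Nat) : Int) = width := by omega
      rw [hwcast] at hrow
      simp only [add_zero, zero_add] at hrow
      have h1w : a * width + width = (a + 1) * width := by ring
      rw [h1w] at hrow
      rw [← hrow]
      -- finish with the induction hypothesis at a+1
      have hre : a + ((m : Nat) + 1 : Nat) = (a + 1) + (m : Nat) := by push_cast; ring
      rw [hre]
      have hctr : a * width + ((width.toNat : Nat) : Int) = (a + 1) * width := by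
        rw [hwcast]; ring
      rw [hctr]
      exact ih (a + 1) _

theorem hashBoard_eq_alt (width : Int) : hashBoard width = hashBoard_alt width := by
  unfold hashBoard hashBoard_alt
  by_cases hw : width ≤ 0
  · rw [if_pos hw, PySem.List.pyRange_one_eq_nil hw]
    rfl
  · rw [if_neg hw]
    have hw' : 0 < width := by omega
    have h := hashBoard_outer_eq width hw' (width.toNat) 0 PySem.Dict.empty
    simp only [zero_mul, zero_add] at h
    have hwcast : ((width.toNat : Nat) : Int) = width := by omega
    rw [hwcast] at h
    rw [h]

-- ===== VERDICT (by name: the statement is the Claim_ definition above) =====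
theorem hashBoard_spec : Claim_equal_hashBoard := by
  intro width _
  show hashBoard width = hashBoard_alt width
  exact hashBoard_eq_alt width
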